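-- pv_equiv track=rewrite | github.com/noahostle/SPEAR | Attacks/full_key_recovery/ladder/ladder.py | canonical_shift_tuple
-- ===== SOURCE A (Python) =====
-- from typing import Dict, List, Optional, Sequence, Tuple
--
-- def canonical_shift_tuple(values: Sequence[int], modulus: int) -> Tuple[int, ...]:
--     unique = sorted({int(value) % modulus for value in values})
--     if not unique:
--         return ()
--     best: Optional[Tuple[int, ...]] = None
--     for base in unique:
--         candidate = tuple(sorted(((value - base) % modulus) for value in unique))
--         if best is None or candidate < best:
--             best = candidate
--     assert best is not None
--     return best
-- ===== SOURCE B (Python) =====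
-- def canonical_shift_tuple(values, modulus):
--     unique = sorted({int(v) % modulus for v in values})
--     k = len(unique)
--     if k == 0:
--         return ()
--     # cyclic gap sequence of the sorted residues
--     gaps = [(unique[(j + 1) % k] - unique[j]) % modulus for j in range(k)]
--     # base whose rotation of the gap sequence is lexicographically least
--     best_i = min(range(k), key=lambda i: gaps[i:] + gaps[:i])
--     base = unique[best_i]
--     return tuple(sorted((v - base) % modulus for v in unique))
-- ===== Notes on version B (the rewrite author's own statement) =====
-- stated objective: faster
-- what changed: A sorts a freshly shifted residue list for every base and keeps a running lexicographic best; B picks the base once as the index of the lexicographically least rotation of the cyclic gap sequence of the sorted residues, then computes the answer with a single final sort; Pre_ excludes modulus = 0, where Python's % raises ZeroDivisionError on any nonempty values.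
-- outside the precondition, e.g. on canonical_shift_tuple([1, 2], 0): A raises ZeroDivisionError, B raises ZeroDivisionError; on canonical_shift_tuple([], 0): A returns (), B returns ()
import Mathlib
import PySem

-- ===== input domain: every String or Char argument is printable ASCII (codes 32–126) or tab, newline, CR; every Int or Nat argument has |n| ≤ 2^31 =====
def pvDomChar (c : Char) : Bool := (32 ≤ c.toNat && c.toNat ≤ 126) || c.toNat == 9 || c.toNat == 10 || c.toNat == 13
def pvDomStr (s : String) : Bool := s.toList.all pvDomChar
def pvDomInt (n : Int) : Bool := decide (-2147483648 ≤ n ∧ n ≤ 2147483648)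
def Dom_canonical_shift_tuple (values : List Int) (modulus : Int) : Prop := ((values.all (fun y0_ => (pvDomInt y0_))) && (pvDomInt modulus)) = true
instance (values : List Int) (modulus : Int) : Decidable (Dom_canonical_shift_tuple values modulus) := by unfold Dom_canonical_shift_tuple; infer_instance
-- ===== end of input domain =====

-- B replaces A's per-base modular re-sorting (a sort inside the loop over all bases) by picking the
-- base via the lexicographically least rotation of the cyclic gap sequence, then sorting once.

-- Python's '<' on tuples/lists of ints: lexicographic, exact (hand port, shared by both sides).
def pyLtList : List Int → List Int → Bool
  | _, [] => false
  | [], _ :: _ => true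
  | a :: as, b :: bs => if a < b then true else if b < a then false else pyLtList as bs

-- ===== PORT A =====
-- A's candidate for one base: tuple(sorted((value - base) % modulus for value in unique))
def pvCand (unique : List Int) (modulus : Int) (base : Int) : List Int :=
  PySem.List.sorted (unique.map (fun value => PySem.Int.mod (value - base) modulus)) (fun x => x) false

-- the body of A's `for base in unique` loop
def pvStepA (unique : List Int) (modulus : Int) (best : Option (List Int)) (base : Int) : Option (List Int) :=
  let candidate := pvCand unique modulus base
  match best with
  | none => some candidate
  | some b => if pyLtList candidate b then some candidate else some b

def canonical_shift_tuple (values : List Int) (modulus : Int) : List Int :=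
  let unique := PySem.List.sorted (PySem.Set.ofList (values.map (fun value => PySem.Int.mod value modulus))) (fun x => x) false
  if unique = [] then []
  else (unique.foldl (pvStepA unique modulus) none).getD []  -- `assert best is not None; return best`

-- ===== PORT B =====
-- B's gap comprehension: [(unique[(j+1) % k] - unique[j]) % modulus for j in range(k)]
-- (indices are always in range, so getD is exact here)
def pvGapsOf (unique : List Int) (modulus : Int) : List Int :=
  (List.range unique.length).map
    (fun j => PySem.Int.mod (unique.getD ((j + 1) % unique.length) 0 - unique.getD j 0) modulus)

-- Python's min(l, key=key): first element with minimal key ([] is never reached here)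
def pvArgmin (key : Nat → List Int) : List Nat → Nat
  | [] => 0
  | x :: xs => (xs.foldl (fun s i => if pyLtList (key i) s.2 then (i, key i) else s) (x, key x)).1

def canonical_shift_tuple_alt (values : List Int) (modulus : Int) : List Int :=
  let unique := PySem.List.sorted (PySem.Set.ofList (values.map (fun v => PySem.Int.mod v modulus))) (fun x => x) false
  if unique.length = 0 then []
  else
    let gaps := pvGapsOf unique modulus
    -- gaps[i:] + gaps[:i] : drop/take is exact for 0 ≤ i ≤ len(gaps)
    let best_i := pvArgmin (fun i => gaps.drop i ++ gaps.take i) (List.range unique.length)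
    let base := unique.getD best_i 0
    PySem.List.sorted (unique.map (fun v => PySem.Int.mod (v - base) modulus)) (fun x => x) false

-- ===== PRECONDITION & SPEC =====
-- Pre_ excludes modulus = 0: there Python's '%' raises ZeroDivisionError on any nonempty values
-- (with empty values both programs return the empty tuple even at modulus = 0).
def Pre_canonical_shift_tuple (values : List Int) (modulus : Int) : Prop := modulus ≠ 0
instance (values : List Int) (modulus : Int) : Decidable (Pre_canonical_shift_tuple values modulus) := by unfold Pre_canonical_shift_tuple; infer_instance
def pvWitness_canonical_shift_tuple : List Int × Int := ([3, 11, 7, 3], 5)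

def Spec_canonical_shift_tuple (values : List Int) (modulus : Int) (out : List Int) : Prop := out = canonical_shift_tuple_alt values modulus
instance (values : List Int) (modulus : Int) (out : List Int) : Decidable (Spec_canonical_shift_tuple values modulus out) := by unfold Spec_canonical_shift_tuple; infer_instance

-- ===== CLAIM (what is proved, stated in full; the proofs are below) =====
def Claim_equal_canonical_shift_tuple : Prop := ∀ (values : List Int) (modulus : Int), Dom_canonical_shift_tuple values modulus → Pre_canonical_shift_tuple values modulus → Spec_canonical_shift_tuple values modulus (canonical_shift_tuple values modulus)

-- ===== LEMMAS AND PROOFS =====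

-- running differences: pvDiffs x [a,b,c] = [a-x, b-a, c-b]
def pvDiffs : Int → List Int → List Int
  | _, [] => []
  | prev, x :: xs => (x - prev) :: pvDiffs x xs

-- running prefix sums starting from acc
def pvPrefix : Int → List Int → List Int
  | _, [] => []
  | acc, d :: ds => (acc + d) :: pvPrefix (acc + d) ds

-- first minimum under pyLtList, seeded with c
def pvMinStep (cur x : List Int) : List Int := if pyLtList x cur then x else cur
def pvMinBy (c : List Int) (l : List (List Int)) : List Int := l.foldl pvMinStep c

-- rebuild a candidate tuple from a gap rotation
def pvF (m : Int) (g : List Int) : List Int :=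
  if 0 < m then 0 :: pvPrefix 0 g.dropLast else pvPrefix m g

-- closed form of A's candidate for base u[i]
def pvCform (u : List Int) (m : Int) (i : Nat) : List Int :=
  if 0 < m then
    (u.drop i).map (fun v => v - u.getD i 0) ++ (u.take i).map (fun v => v - u.getD i 0 + m)
  else
    (u.drop (i+1)).map (fun v => v - u.getD i 0 + m) ++ (u.take (i+1)).map (fun v => v - u.getD i 0)

-- the uniform shift between B's %-reduced gaps and the plain gap sequence
def pvShift (m : Int) (rest : List Int) : Int :=
  if 0 < m then (if rest = [] then -m else 0) else m

-- ---- Python % on the residue ranges ----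
theorem pvmod_id_pos {m t : Int} (hm : 0 < m) (h0 : 0 ≤ t) (h1 : t < m) :
    PySem.Int.mod t m = t := by
  rw [PySem.Int.mod_eq_emod_of_pos hm]; exact Int.emod_eq_of_lt h0 h1

theorem pvmod_shift_pos {m t : Int} (hm : 0 < m) (h0 : -m < t) (h1 : t < 0) :
    PySem.Int.mod t m = t + m := by
  rw [PySem.Int.mod_eq_emod_of_pos hm]
  have h2 : (t + m * 1) % m = t % m := Int.add_mul_emod_self_left t m 1
  rw [← h2]; simp only [mul_one]; exact Int.emod_eq_of_lt (by omega) (by omega)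

theorem pvmod_id_neg {m t : Int} (hm : m < 0) (h0 : m < t) (h1 : t ≤ 0) :
    PySem.Int.mod t m = t := by
  have hq := PySem.Int.floordiv_mul_add_mod t m
  have hb := PySem.Int.mod_neg_bounds t hm
  set q := PySem.Int.floordiv t m with hqdef
  rcases lt_trichotomy q 0 with h | h | h
  · have hp : 0 ≤ (-(q+1)) * (-m) := mul_nonneg (by omega) (by omega)
    have : q * m + m ≥ 0 := by nlinarith
    linarith [hb.1, hb.2]
  · rw [h] at hq; simp at hq; omega
  · have hp : 0 ≤ (q - 1) * (-m) := mul_nonneg (by omega) (by omega)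
    have : q * m ≤ m := by nlinarith
    linarith [hb.1, hb.2]

theorem pvmod_shift_neg {m t : Int} (hm : m < 0) (h0 : 0 < t) (h1 : t < -m) :
    PySem.Int.mod t m = t + m := by
  have hq := PySem.Int.floordiv_mul_add_mod t m
  have hb := PySem.Int.mod_neg_bounds t hm
  set q := PySem.Int.floordiv t m with hqdef
  rcases lt_trichotomy q (-1) with h | h | h
  · have hp : 0 ≤ (-(q+2)) * (-m) := mul_nonneg (by omega) (by omega)
    have : q * m ≥ -m + -m := by nlinarith
    linarith [hb.1, hb.2]
  · rw [h] at hq; omega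
  · have hp : 0 ≤ q * (-m) := mul_nonneg (by omega) (by omega)
    have : q * m ≤ 0 := by nlinarith
    linarith [hb.1, hb.2]

-- ---- pvDiffs / pvPrefix structure ----
theorem pvDiffs_take (x : Int) (l : List Int) (i : Nat) :
    (pvDiffs x l).take i = pvDiffs x (l.take i) := by
  induction l generalizing x i with
  | nil => simp [pvDiffs]
  | cons y ys ih =>
    cases i with
    | zero => simp [pvDiffs]
    | succ j => simp [pvDiffs, ih]

theorem pvDiffs_drop (x : Int) (l : List Int) (i : Nat) (h : i ≤ l.length) :
    (pvDiffs x l).drop i = pvDiffs ((x :: l).getD i 0) (l.drop i) := by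
  induction l generalizing x i with
  | nil =>
    have h0 : i = 0 := by simpa using h
    subst h0; simp [pvDiffs]
  | cons y ys ih =>
    cases i with
    | zero => simp [pvDiffs]
    | succ j => simpa [pvDiffs] using ih y j (by simpa using h)

theorem pvDiffs_length (x : Int) (l : List Int) : (pvDiffs x l).length = l.length := by
  induction l generalizing x with
  | nil => rfl
  | cons y ys ih => simp [pvDiffs, ih]

theorem pvGetLastD_cons (a d : Int) (l : List Int) : (a :: l).getLastD d = l.getLastD a := by
  cases l with
  | nil => rfl
  | cons b bs => simp [List.getLastD, List.getLast?_cons_cons]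

theorem pvDiffs_sum (x : Int) (l : List Int) : (pvDiffs x l).sum = l.getLastD x - x := by
  induction l generalizing x with
  | nil => simp [pvDiffs]
  | cons y ys ih =>
    simp only [pvDiffs, List.sum_cons, ih]
    rw [pvGetLastD_cons]
    ring

theorem pvPrefix_append (acc : Int) (g h : List Int) :
    pvPrefix acc (g ++ h) = pvPrefix acc g ++ pvPrefix (acc + g.sum) h := by
  induction g generalizing acc with
  | nil => simp [pvPrefix]
  | cons d ds ih => simp [pvPrefix, ih, add_assoc]

theorem pvPrefix_diffs (acc x : Int) (l : List Int) :
    pvPrefix acc (pvDiffs x l) = l.map (fun v => v - x + acc) := by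
  induction l generalizing acc x with
  | nil => simp [pvDiffs, pvPrefix]
  | cons y ys ih =>
    simp only [pvDiffs, pvPrefix, List.map_cons, ih]
    refine List.cons_eq_cons.mpr ⟨by ring, ?_⟩
    apply List.map_congr_left
    intro a _
    ring

theorem pvDiffs_dropLast (x : Int) (l : List Int) :
    (pvDiffs x l).dropLast = pvDiffs x l.dropLast := by
  rw [List.dropLast_eq_take, List.dropLast_eq_take, pvDiffs_length, pvDiffs_take]

theorem pvDiffs_getD (x : Int) (l : List Int) (j : Nat) (h : j < l.length) :
    (pvDiffs x l).getD j 0 = l.getD j 0 - (x :: l).getD j 0 := by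
  induction l generalizing x j with
  | nil => simp at h
  | cons y ys ih =>
    cases j with
    | zero => simp [pvDiffs]
    | succ n => simpa [pvDiffs] using ih y n (by simpa using h)

theorem pvGetLastD_getD (l : List Int) (x : Int) : l.getLastD x = (x :: l).getD l.length 0 := by
  induction l generalizing x with
  | nil => rfl
  | cons y ys ih => rw [pvGetLastD_cons, ih]; rfl

-- ---- pyLtList is transported by pvF on lists of equal length and sum ----
theorem pvPrefix_lt (acc : Int) (a b : List Int) (hl : a.length = b.length) :
    pyLtList (pvPrefix acc a) (pvPrefix acc b) = pyLtList a b := by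
  induction a generalizing acc b with
  | nil => cases b with
    | nil => rfl
    | cons y ys => simp at hl
  | cons x xs ih =>
    cases b with
    | nil => simp at hl
    | cons y ys =>
      simp only [pvPrefix, pyLtList]
      by_cases h1 : x < y
      · simp [h1, show acc + x < acc + y by omega]
      · by_cases h2 : y < x
        · simp [h2, show ¬ (acc + x < acc + y) by omega, show acc + y < acc + x by omega,
                show ¬ (x < y) from h1]
        · have : x = y := le_antisymm (not_lt.mp h2) (not_lt.mp h1)
          subst this
          simp only [lt_irrefl, if_false]
          exact ih (acc + x) ys (by simpa using hl)

theorem pvPrefix_lt_dropLast (acc : Int) (a b : List Int) (hl : a.length = b.length)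
    (hs : a.sum = b.sum) :
    pyLtList (pvPrefix acc a.dropLast) (pvPrefix acc b.dropLast) = pyLtList a b := by
  induction a generalizing acc b with
  | nil => cases b with
    | nil => rfl
    | cons y ys => simp at hl
  | cons x xs ih =>
    cases b with
    | nil => simp at hl
    | cons y ys =>
      cases xs with
      | nil =>
        cases ys with
        | nil =>
          have : x = y := by simpa using hs
          subst this
          simp [pvPrefix, pyLtList]
        | cons z zs => simp at hl
      | cons x' xs' =>
        cases ys with
        | nil => simp at hl
        | cons y' ys' =>
          have e1 : (x :: x' :: xs').dropLast = x :: (x' :: xs').dropLast := rfl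
          have e2 : (y :: y' :: ys').dropLast = y :: (y' :: ys').dropLast := rfl
          rw [e1, e2]
          simp only [pvPrefix, pyLtList]
          by_cases h1 : x < y
          · simp [h1, show acc + x < acc + y by omega]
          · by_cases h2 : y < x
            · simp [h2, show ¬ (acc + x < acc + y) by omega, show acc + y < acc + x by omega,
                    show ¬ (x < y) from h1]
            · have : x = y := le_antisymm (not_lt.mp h2) (not_lt.mp h1)
              subst this
              simp only [lt_irrefl, if_false]
              exact ih (acc + x) (y' :: ys') (by simpa using hl)
                (by simp only [List.sum_cons] at hs ⊢; omega)

theorem pvF_lt (m : Int) (a b : List Int) (hl : a.length = b.length) (hs : a.sum = b.sum) :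
    pyLtList (pvF m a) (pvF m b) = pyLtList a b := by
  unfold pvF
  by_cases hm : 0 < m
  · simp only [hm, if_true, pyLtList, lt_irrefl, if_false]
    exact pvPrefix_lt_dropLast 0 a b hl hs
  · simp only [hm, if_false]
    exact pvPrefix_lt m a b hl

-- ---- pyLtList is invariant under adding a constant pointwise ----
theorem pyLt_map_add (d : Int) : ∀ (a b : List Int),
    pyLtList (a.map (fun g => g + d)) (b.map (fun g => g + d)) = pyLtList a b := by
  intro a
  induction a with
  | nil => intro b; cases b <;> simp [pyLtList]
  | cons x xs ih =>
    intro b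
    cases b with
    | nil => simp [pyLtList]
    | cons y ys =>
      simp only [List.map_cons, pyLtList]
      by_cases h1 : x < y
      · simp [h1, show x + d < y + d by omega]
      · by_cases h2 : y < x
        · simp [h1, h2, show ¬ (x + d < y + d) by omega, show y + d < x + d by omega]
        · have : x = y := le_antisymm (not_lt.mp h2) (not_lt.mp h1)
          subst this
          simp only [lt_irrefl, if_false]
          exact ih ys

-- ---- A's loop is a pvMinBy over the candidates ----
theorem pvFoldA (u : List Int) (m : Int) :
    ∀ (l : List Int) (c : List Int),
      l.foldl (pvStepA u m) (some c) = some (pvMinBy c (l.map (pvCand u m))) := by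
  intro l
  induction l with
  | nil => intro c; simp [pvMinBy]
  | cons x xs ih =>
    intro c
    simp only [List.foldl_cons, List.map_cons, pvMinBy, List.foldl_cons, pvStepA, pvMinStep]
    by_cases h : pyLtList (pvCand u m x) c = true
    · simp only [h, if_true]; exact ih (pvCand u m x)
    · simp only [h, if_false]; exact ih c

-- ---- B's argmin fold computes the same first minimum through any key-faithful view ----
theorem pvArgmin_fold (c key : Nat → List Int) (P : Nat → Prop)
    (h : ∀ i j, P i → P j → pyLtList (c i) (c j) = pyLtList (key i) (key j)) :
    ∀ (l : List Nat) (b : Nat), P b → (∀ i ∈ l, P i) →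
      pvMinBy (c b) (l.map c)
        = c ((l.foldl (fun s i => if pyLtList (key i) s.2 then (i, key i) else s) (b, key b)).1) := by
  intro l
  induction l with
  | nil => intro b _ _; simp [pvMinBy]
  | cons i xs ih =>
    intro b hb hl
    have hi : P i := hl i (by simp)
    simp only [List.map_cons, pvMinBy, List.foldl_cons, pvMinStep]
    rw [h i b hi hb]
    cases hkb : pyLtList (key i) (key b) with
    | true =>
      simp only [hkb, if_true]
      exact ih i hi (fun y hy => hl y (by simp [hy]))
    | false =>
      simp only [hkb, Bool.false_eq_true, if_false]
      exact ih b hb (fun y hy => hl y (by simp [hy]))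

-- ---- membership/order facts on a strictly sorted list ----
theorem pv_take_lt (u : List Int) (hpw : u.Pairwise (· < ·)) (i : Nat) (hi : i < u.length) :
    ∀ v ∈ u.take i, v < u.getD i 0 := by
  intro v hv
  have hsplit := List.take_append_drop i u
  have hpw' : (u.take i ++ u.drop i).Pairwise (· < ·) := by rw [hsplit]; exact hpw
  have hcross := (List.pairwise_append.mp hpw').2.2
  have hdrop : u.drop i = u[i] :: u.drop (i+1) := List.drop_eq_getElem_cons hi
  have hb : u.getD i 0 = u[i] := List.getD_eq_getElem u 0 hi
  rw [hb]
  exact hcross v hv u[i] (by rw [hdrop]; exact List.mem_cons_self ..)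

theorem pv_drop_ge (u : List Int) (hpw : u.Pairwise (· < ·)) (i : Nat) (hi : i < u.length) :
    ∀ v ∈ u.drop i, u.getD i 0 ≤ v := by
  intro v hv
  have hdrop : u.drop i = u[i] :: u.drop (i+1) := List.drop_eq_getElem_cons hi
  have hb : u.getD i 0 = u[i] := List.getD_eq_getElem u 0 hi
  have hpwd : (u.drop i).Pairwise (· < ·) := hpw.sublist (List.drop_sublist i u)
  rw [hdrop] at hpwd hv
  rw [hb]
  rcases List.mem_cons.mp hv with h | h
  · omega
  · exact le_of_lt ((List.pairwise_cons.mp hpwd).1 v h)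

theorem pv_take_succ_le (u : List Int) (hpw : u.Pairwise (· < ·)) (i : Nat) (hi : i < u.length) :
    ∀ v ∈ u.take (i+1), v ≤ u.getD i 0 := by
  intro v hv
  rw [List.take_succ] at hv
  have hb : u.getD i 0 = u[i] := List.getD_eq_getElem u 0 hi
  rcases List.mem_append.mp hv with h | h
  · exact le_of_lt (by rw [← hb] at *; exact pv_take_lt u hpw i hi v h)
  · have : u[i]? = some u[i] := List.getElem?_eq_getElem hi
    rw [this] at h; simp at h; omega

theorem pv_drop_succ_gt (u : List Int) (hpw : u.Pairwise (· < ·)) (i : Nat) (hi : i < u.length) :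
    ∀ v ∈ u.drop (i+1), u.getD i 0 < v := by
  intro v hv
  have hdrop : u.drop i = u[i] :: u.drop (i+1) := List.drop_eq_getElem_cons hi
  have hb : u.getD i 0 = u[i] := List.getD_eq_getElem u 0 hi
  have hpwd : (u.drop i).Pairwise (· < ·) := hpw.sublist (List.drop_sublist i u)
  rw [hdrop] at hpwd
  rw [hb]
  exact (List.pairwise_cons.mp hpwd).1 v hv

theorem pv_getD_mem (u : List Int) (j : Nat) (h : j < u.length) : u.getD j 0 ∈ u := by
  rw [List.getD_eq_getElem u 0 h]; exact List.getElem_mem h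

theorem pv_getD_lt (u : List Int) (hpw : u.Pairwise (· < ·)) (i j : Nat)
    (hij : i < j) (hj : j < u.length) : u.getD i 0 < u.getD j 0 := by
  rw [List.getD_eq_getElem u 0 (by omega), List.getD_eq_getElem u 0 hj]
  exact List.pairwise_iff_getElem.mp hpw i j (by omega) hj hij

-- ---- A's candidate in closed form ----
theorem pvSortedCand (u : List Int) (m : Int) (i : Nat)
    (hm : m ≠ 0) (hpw : u.Pairwise (· < ·))
    (hb : ∀ x ∈ u, (0 < m → 0 ≤ x ∧ x < m) ∧ (m < 0 → m < x ∧ x ≤ 0))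
    (hi : i < u.length) :
    pvCand u m (u.getD i 0) = pvCform u m i := by
  unfold pvCand
  have hbmem : u.getD i 0 ∈ u := by
    rw [List.getD_eq_getElem u 0 hi]; exact List.getElem_mem hi
  set b := u.getD i 0 with hbdef
  rcases lt_trichotomy m 0 with hneg | hzero | hpos
  · have hbound := fun x hx => (hb x hx).2 hneg
    have hmap : u.map (fun v => PySem.Int.mod (v - b) m)
        = (u.take (i+1)).map (fun v => v - b) ++ (u.drop (i+1)).map (fun v => v - b + m) := by
      conv_lhs => rw [← List.take_append_drop (i+1) u]
      rw [List.map_append]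
      congr 1
      · apply List.map_congr_left
        intro v hv
        have h1 : v ≤ b := pv_take_succ_le u hpw i hi v hv
        have h2 := hbound v (List.mem_of_mem_take hv)
        have h3 := hbound _ hbmem
        exact pvmod_id_neg hneg (by omega) (by omega)
      · apply List.map_congr_left
        intro v hv
        have h1 : b < v := pv_drop_succ_gt u hpw i hi v hv
        have h2 := hbound v (List.mem_of_mem_drop hv)
        have h3 := hbound _ hbmem
        exact pvmod_shift_neg hneg (by omega) (by omega)
    have hperm : (pvCform u m i).Perm (u.map (fun v => PySem.Int.mod (v - b) m)) := by
      rw [hmap]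
      unfold pvCform
      rw [if_neg (by omega)]
      exact List.perm_append_comm
    apply PySem.List.sorted_eq_of_perm_of_pairwise_lt _ _ _ hperm
    · unfold pvCform
      rw [if_neg (by omega)]
      apply List.pairwise_append.mpr
      refine ⟨?_, ?_, ?_⟩
      · exact List.Pairwise.map _ (fun h => by omega) (hpw.sublist (List.drop_sublist (i+1) u))
      · exact List.Pairwise.map _ (fun h => by omega) (hpw.sublist (List.take_sublist (i+1) u))
      · intro p hp q hq
        rcases List.mem_map.mp hp with ⟨v, hv, rfl⟩
        rcases List.mem_map.mp hq with ⟨w, hw, rfl⟩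
        have h1 := hbound v (List.mem_of_mem_drop hv)
        have h2 := hbound w (List.mem_of_mem_take hw)
        omega
  · omega
  · have hbound := fun x hx => (hb x hx).1 hpos
    have hmap : u.map (fun v => PySem.Int.mod (v - b) m)
        = (u.take i).map (fun v => v - b + m) ++ (u.drop i).map (fun v => v - b) := by
      conv_lhs => rw [← List.take_append_drop i u]
      rw [List.map_append]
      congr 1
      · apply List.map_congr_left
        intro v hv
        have h1 : v < b := pv_take_lt u hpw i hi v hv
        have h2 := hbound v (List.mem_of_mem_take hv)
        have h3 := hbound _ hbmem
        exact pvmod_shift_pos hpos (by omega) (by omega)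
      · apply List.map_congr_left
        intro v hv
        have h1 : b ≤ v := pv_drop_ge u hpw i hi v hv
        have h2 := hbound v (List.mem_of_mem_drop hv)
        have h3 := hbound _ hbmem
        exact pvmod_id_pos hpos (by omega) (by omega)
    have hperm : (pvCform u m i).Perm (u.map (fun v => PySem.Int.mod (v - b) m)) := by
      rw [hmap]
      unfold pvCform
      rw [if_pos hpos]
      exact List.perm_append_comm
    apply PySem.List.sorted_eq_of_perm_of_pairwise_lt _ _ _ hperm
    · unfold pvCform
      rw [if_pos hpos]
      apply List.pairwise_append.mpr
      refine ⟨?_, ?_, ?_⟩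
      · exact List.Pairwise.map _ (fun h => by omega) (hpw.sublist (List.drop_sublist i u))
      · exact List.Pairwise.map _ (fun h => by omega) (hpw.sublist (List.take_sublist i u))
      · intro p hp q hq
        rcases List.mem_map.mp hp with ⟨v, hv, rfl⟩
        rcases List.mem_map.mp hq with ⟨w, hw, rfl⟩
        have h1 := hbound v (List.mem_of_mem_drop hv)
        have h2 := hbound w (List.mem_of_mem_take hw)
        omega

-- ---- zip-with-tail differences are pvDiffs ----
theorem pvZipDiff (x : Int) (rest : List Int) :
    (((x :: rest).zip (x :: rest).tail).map (fun p => p.2 - p.1)) = pvDiffs x rest := by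
  induction rest generalizing x with
  | nil => rfl
  | cons y ys ih => simpa [pvDiffs] using ih y

theorem pvGetLastD_drop (rest : List Int) (x : Int) (i : Nat) (h : i ≤ rest.length) :
    (rest.drop i).getLastD ((x :: rest).getD i 0) = rest.getLastD x := by
  induction rest generalizing x i with
  | nil =>
    have h0 : i = 0 := by simpa using h
    subst h0; simp
  | cons r rs ih =>
    cases i with
    | zero => rfl
    | succ j =>
      have hrec := ih r j (by simpa using h)
      rw [pvGetLastD_cons r x rs]
      exact hrec

-- ---- the gap rotation rebuilds the closed form ----
theorem pvF_rot (u : List Int) (m : Int) (i : Nat)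
    (hm : m ≠ 0) (hi : i < u.length) :
    pvF m ((((u.zip u.tail).map (fun p => p.2 - p.1)) ++ [u.headD 0 - u.getLastD 0 + |m|]).drop i
           ++ (((u.zip u.tail).map (fun p => p.2 - p.1)) ++ [u.headD 0 - u.getLastD 0 + |m|]).take i)
      = pvCform u m i := by
  cases u with
  | nil => simp at hi
  | cons x rest =>
  have hi' : i ≤ rest.length := by simpa using Nat.lt_succ_iff.mp (by simpa using hi)
  rw [pvZipDiff]
  have hlast : (x :: rest).getLastD 0 = rest.getLastD x := pvGetLastD_cons x 0 rest
  rw [show (x :: rest).headD 0 = x from rfl, hlast]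
  set w := x - rest.getLastD x + |m| with hw
  set b := (x :: rest).getD i 0 with hbdef
  have hdl : (pvDiffs x rest).length = rest.length := pvDiffs_length x rest
  have hdrop : (pvDiffs x rest ++ [w]).drop i = pvDiffs b (rest.drop i) ++ [w] := by
    rw [List.drop_append_of_le_length (by omega), pvDiffs_drop x rest i hi']
  have htake : (pvDiffs x rest ++ [w]).take i = pvDiffs x (rest.take i) := by
    rw [List.take_append_of_le_length (by omega), pvDiffs_take]
  rw [hdrop, htake]
  have hsumA : (pvDiffs b (rest.drop i)).sum = rest.getLastD x - b := by
    rw [pvDiffs_sum, hbdef, pvGetLastD_drop rest x i hi']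
  rcases lt_trichotomy m 0 with hneg | hzero | hpos
  · have habs : |m| = -m := abs_of_neg hneg
    unfold pvF pvCform
    rw [if_neg (by omega), if_neg (by omega)]
    rw [show pvDiffs b (rest.drop i) ++ [w] ++ pvDiffs x (rest.take i)
        = pvDiffs b (rest.drop i) ++ ([w] ++ pvDiffs x (rest.take i)) by simp]
    rw [pvPrefix_append, pvPrefix_append, pvPrefix_diffs, hsumA]
    rw [show ([w] : List Int).sum = w from by simp]
    rw [show pvPrefix (m + (rest.getLastD x - b)) [w] = [m + (rest.getLastD x - b) + w] from rfl]
    have hacc : m + (rest.getLastD x - b) + w = x - b := by rw [hw, habs]; ring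
    rw [hacc]
    rw [pvPrefix_diffs]
    have e1 : (x :: rest).drop (i+1) = rest.drop i := rfl
    have e2 : (x :: rest).take (i+1) = x :: rest.take i := rfl
    rw [e1, e2]
    simp only [List.map_cons]
    rw [show (fun v => v - x + (x - b)) = (fun v => v - b) from by funext v; ring]
    rw [hbdef]
    simp [List.append_assoc]
  · omega
  · have habs : |m| = m := abs_of_pos hpos
    unfold pvF pvCform
    rw [if_pos hpos, if_pos hpos]
    cases i with
    | zero =>
      simp only [List.drop_zero, List.take_zero, pvDiffs]
      rw [hbdef]
      rw [show ((x :: rest).getD 0 0 : Int) = x from rfl]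
      rw [show (pvDiffs x rest ++ [w] : List Int) ++ [] = pvDiffs x rest ++ [w] from by simp]
      rw [List.dropLast_concat, pvPrefix_diffs]
      rw [show (fun v => v - x + (0:Int)) = (fun v => v - x) from by funext v; ring]
      simp
    | succ j =>
      have hj : j < rest.length := by omega
      have hBne : pvDiffs x (rest.take (j+1)) ≠ [] := by
        intro h
        have := pvDiffs_length x (rest.take (j+1))
        rw [h] at this
        simp at this; omega
      rw [show pvDiffs b (rest.drop (j+1)) ++ [w] ++ pvDiffs x (rest.take (j+1))
          = (pvDiffs b (rest.drop (j+1)) ++ [w]) ++ pvDiffs x (rest.take (j+1)) from by simp]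
      rw [List.dropLast_append_of_ne_nil hBne]
      rw [pvDiffs_dropLast]
      have hdlt : (rest.take (j+1)).dropLast = rest.take j := by
        rw [List.dropLast_eq_take, List.length_take]
        rw [show min (j+1) rest.length = j+1 by omega]
        rw [List.take_take]
        congr 1
        omega
      rw [hdlt]
      rw [show (pvDiffs b (rest.drop (j+1)) ++ [w]) ++ pvDiffs x (rest.take j)
          = pvDiffs b (rest.drop (j+1)) ++ ([w] ++ pvDiffs x (rest.take j)) from by simp]
      rw [pvPrefix_append, pvPrefix_append, pvPrefix_diffs, hsumA]
      rw [show ([w] : List Int).sum = w from by simp]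
      rw [show pvPrefix (0 + (rest.getLastD x - b)) [w] = [0 + (rest.getLastD x - b) + w] from rfl]
      have hacc : (0:Int) + (rest.getLastD x - b) + w = x - b + m := by rw [hw, habs]; ring
      rw [hacc]
      rw [pvPrefix_diffs]
      have e1 : (x :: rest).drop (j+1) = rest.drop j := rfl
      have e2 : (x :: rest).take (j+1) = x :: rest.take j := rfl
      rw [e1, e2]
      have hdj : rest.drop j = b :: rest.drop (j+1) := by
        rw [List.drop_eq_getElem_cons hj]
        congr 1
        rw [hbdef]
        simp [List.getD, List.getElem?_eq_getElem hj]
      rw [hdj]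
      simp only [List.map_cons]
      rw [show (fun v => v - x + (x - b + m)) = (fun v => v - b + m) from by funext v; ring]
      rw [hbdef]
      simp [List.append_assoc]

-- ---- rotations keep length and sum ----
theorem pvRotP (G : List Int) (i : Nat) (h : i ≤ G.length) :
    (G.drop i ++ G.take i).length = G.length ∧ (G.drop i ++ G.take i).sum = G.sum := by
  constructor
  · simp [List.length_append]; omega
  · have := congrArg List.sum (List.take_append_drop i G)
    simp only [List.sum_append] at this ⊢
    omega

-- ---- B's %-reduced gaps are the plain gap sequence shifted by one constant ----
theorem pvGapsB (x : Int) (rest : List Int) (m : Int) (hm : m ≠ 0)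
    (hpw : (x :: rest).Pairwise (· < ·))
    (hb : ∀ v ∈ x :: rest, (0 < m → 0 ≤ v ∧ v < m) ∧ (m < 0 → m < v ∧ v ≤ 0)) :
    pvGapsOf (x :: rest) m
      = (pvDiffs x rest ++ [x - rest.getLastD x + |m|]).map (fun g => g + pvShift m rest) := by
  unfold pvGapsOf
  have hk : (x :: rest).length = rest.length + 1 := by simp
  apply List.ext_getElem
  · simp [pvDiffs_length]
  · intro j h1 h2
    have hj : j < rest.length + 1 := by simpa [pvDiffs_length] using h2
    simp only [List.getElem_map, List.getElem_range]
    have h2' : j < (pvDiffs x rest ++ [x - rest.getLastD x + |m|]).length := by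
      rw [List.length_append, pvDiffs_length]; simpa using hj
    rw [← List.getD_eq_getElem _ 0 h2']
    rw [hk]
    rcases Nat.lt_or_ge j rest.length with hjl | hje
    · -- interior gap
      have hmod : (j + 1) % (rest.length + 1) = j + 1 := Nat.mod_eq_of_lt (by omega)
      rw [hmod]
      have hgd : (pvDiffs x rest ++ [x - rest.getLastD x + |m|]).getD j 0
          = (pvDiffs x rest).getD j 0 := by
        rw [List.getD_append _ _ _ _ (by rw [pvDiffs_length]; omega)]
      rw [hgd, pvDiffs_getD x rest j hjl]
      have hr : rest.getD j 0 = (x :: rest).getD (j+1) 0 := rfl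
      rw [hr]
      set t := (x :: rest).getD (j+1) 0 - (x :: rest).getD j 0 with ht
      have hlt : (x :: rest).getD j 0 < (x :: rest).getD (j+1) 0 :=
        pv_getD_lt _ hpw j (j+1) (by omega) (by simp; omega)
      have hb1 := hb _ (pv_getD_mem (x :: rest) j (by simp; omega))
      have hb2 := hb _ (pv_getD_mem (x :: rest) (j+1) (by simp; omega))
      have hne : rest ≠ [] := by intro h; rw [h] at hjl; simp at hjl
      rcases lt_trichotomy m 0 with hneg | hz | hpos
      · rw [show pvShift m rest = m from by unfold pvShift; rw [if_neg (by omega)]]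
        rw [pvmod_shift_neg hneg (by omega) (by omega)]
      · omega
      · rw [show pvShift m rest = 0 from by unfold pvShift; rw [if_pos hpos, if_neg hne]]
        rw [pvmod_id_pos hpos (by omega) (by omega)]
        omega
    · -- wrap-around gap: j = rest.length
      have hjeq : j = rest.length := by omega
      subst hjeq
      rw [Nat.mod_self]
      have hgd : (pvDiffs x rest ++ [x - rest.getLastD x + |m|]).getD rest.length 0
          = x - rest.getLastD x + |m| := by
        rw [List.getD_append_right _ _ _ _ (by rw [pvDiffs_length])]
        rw [pvDiffs_length]
        simp
      rw [hgd]
      rw [show ((x :: rest).getD 0 0 : Int) = x from rfl]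
      rw [← pvGetLastD_getD rest x]
      cases rest with
      | nil =>
        simp only [List.getLastD]
        rw [show x - x = (0:Int) by ring]
        rcases lt_trichotomy m 0 with hneg | hz | hpos
        · rw [show pvShift m ([] : List Int) = m from by unfold pvShift; rw [if_neg (by omega)]]
          rw [pvmod_id_neg hneg (by omega) (by omega)]
          rw [abs_of_neg hneg]; ring
        · omega
        · rw [show pvShift m ([] : List Int) = -m from by unfold pvShift; rw [if_pos hpos, if_pos rfl]]
          rw [pvmod_id_pos hpos (by omega) (by omega)]
          rw [abs_of_pos hpos]; ring
      | cons r rs =>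
        set L := (r :: rs).getLastD x with hL
        have hLmem : L ∈ x :: r :: rs := by
          rw [hL, pvGetLastD_getD (r :: rs) x]
          exact pv_getD_mem _ _ (by simp)
        have hxL : x < L := by
          rw [hL, pvGetLastD_getD (r :: rs) x]
          exact pv_getD_lt _ hpw 0 (r :: rs).length (by simp) (by simp)
        have hbx := hb x (by simp)
        have hbL := hb L hLmem
        rcases lt_trichotomy m 0 with hneg | hz | hpos
        · rw [show pvShift m (r :: rs) = m from by unfold pvShift; rw [if_neg (by omega)]]
          rw [abs_of_neg hneg]
          rw [pvmod_id_neg hneg (by omega) (by omega)]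
          ring
        · omega
        · rw [show pvShift m (r :: rs) = 0 from by
            unfold pvShift; rw [if_pos hpos, if_neg (by simp)]]
          rw [abs_of_pos hpos]
          rw [pvmod_shift_pos hpos (by omega) (by omega)]
          ring

-- ---- the common core: both bodies agree on the sorted residue list ----
theorem pvCore (u : List Int) (m : Int) (hm : m ≠ 0) (hpw : u.Pairwise (· < ·))
    (hb : ∀ x ∈ u, (0 < m → 0 ≤ x ∧ x < m) ∧ (m < 0 → m < x ∧ x ≤ 0)) :
    (if u = [] then [] else (u.foldl (pvStepA u m) none).getD [])
    = (if u.length = 0 then []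
       else
         PySem.List.sorted
           (u.map (fun v => PySem.Int.mod
             (v - u.getD (pvArgmin (fun i => (pvGapsOf u m).drop i ++ (pvGapsOf u m).take i)
                 (List.range u.length)) 0) m))
           (fun x => x) false) := by
  cases u with
  | nil => simp
  | cons x rest =>
    have hne : x :: rest ≠ [] := by simp
    rw [if_neg hne, if_neg (by simp)]
    set k := rest.length + 1 with hkdef
    -- the plain gap sequence
    set G := pvDiffs x rest ++ [x - rest.getLastD x + |m|] with hG
    have hGlen : G.length = k := by rw [hG, List.length_append, pvDiffs_length]; simp [hkdef]
    -- candidates as a function of the base index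
    set c : Nat → List Int := fun i => pvCand (x :: rest) m ((x :: rest).getD i 0) with hc
    -- B's rotation key
    set key : Nat → List Int :=
      fun i => (pvGapsOf (x :: rest) m).drop i ++ (pvGapsOf (x :: rest) m).take i with hkey
    -- A side
    have hA : ((x :: rest).foldl (pvStepA (x :: rest) m) none).getD []
        = pvMinBy (c 0) (rest.map (pvCand (x :: rest) m)) := by
      rw [List.foldl_cons]
      rw [show pvStepA (x :: rest) m none x = some (pvCand (x :: rest) m x) from rfl]
      rw [pvFoldA]
      rfl
    rw [hA]
    have hlist : rest.map (pvCand (x :: rest) m)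
        = ((List.range rest.length).map Nat.succ).map c := by
      rw [List.map_map]
      apply List.ext_getElem
      · simp
      · intro j hj1 hj2
        simp only [List.getElem_map, List.getElem_range, Function.comp]
        have hjr : j < rest.length := by simpa using hj1
        have hget : rest[j] = (x :: rest).getD (j+1) 0 := by
          simp [List.getD, List.getElem?_eq_getElem hjr]
        rw [hget]
    rw [hlist]
    -- candidates through the closed form are pvF of the plain rotations
    have hcand : ∀ i, i < k → c i = pvF m (G.drop i ++ G.take i) := by
      intro i hi
      have hi' : i < (x :: rest).length := by simp; omega
      show pvCand (x :: rest) m ((x :: rest).getD i 0) = pvF m (G.drop i ++ G.take i)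
      rw [pvSortedCand (x :: rest) m i hm hpw hb hi']
      rw [← pvF_rot (x :: rest) m i hm hi']
      congr 2 <;>
        rw [pvZipDiff, show (x :: rest).headD 0 = x from rfl, pvGetLastD_cons x 0 rest]
    -- B's keys are the plain rotations shifted pointwise
    have hkeyrot : ∀ i, key i = (G.drop i ++ G.take i).map (fun g => g + pvShift m rest) := by
      intro i
      show (pvGapsOf (x :: rest) m).drop i ++ (pvGapsOf (x :: rest) m).take i = _
      rw [pvGapsB x rest m hm hpw hb, ← hG]
      simp [List.map_append, List.map_take, List.map_drop]
    -- key comparisons mirror candidate comparisons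
    have hkc : ∀ i j, i < k → j < k → pyLtList (c i) (c j) = pyLtList (key i) (key j) := by
      intro i j hi hj
      rw [hcand i hi, hcand j hj, hkeyrot i, hkeyrot j]
      rw [pyLt_map_add]
      have hpi := pvRotP G i (by omega)
      have hpj := pvRotP G j (by omega)
      exact pvF_lt m _ _ (by omega) (by omega)
    -- argmin fold equals first minimum of candidates
    have hfold := pvArgmin_fold c key (fun i => i < k) hkc
      ((List.range rest.length).map Nat.succ) 0 (by omega)
      (by intro i hi; rcases List.mem_map.mp hi with ⟨j, hj, rfl⟩; simp at hj; omega)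
    rw [hfold]
    -- identify with B's pvArgmin on range k
    have hrange : List.range (x :: rest).length = 0 :: (List.range rest.length).map Nat.succ := by
      simp only [List.length_cons]
      exact List.range_succ_eq_map
    rw [show (x :: rest).length = k from by simp [hkdef]] at hrange ⊢
    rw [hrange]
    rfl

-- bounds on the residues in the sorted deduplicated list
theorem pvBounds (values : List Int) (m : Int) (hm : m ≠ 0) :
    ∀ x ∈ PySem.List.sorted (PySem.Set.ofList (values.map (fun value => PySem.Int.mod value m))) (fun x => x) false,
      (0 < m → 0 ≤ x ∧ x < m) ∧ (m < 0 → m < x ∧ x ≤ 0) := by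
  intro x hx
  rw [PySem.List.mem_sorted, PySem.Set.mem_ofList] at hx
  rcases List.mem_map.mp hx with ⟨v, _, rfl⟩
  constructor
  · intro hp
    exact ⟨PySem.Int.mod_nonneg v hp, PySem.Int.mod_lt v hp⟩
  · intro hn
    exact PySem.Int.mod_neg_bounds v hn

-- ===== VERDICT (by name: the statement is the Claim_ definition above) =====
theorem canonical_shift_tuple_spec : Claim_equal_canonical_shift_tuple := by
  intro values modulus _ hpre
  unfold Spec_canonical_shift_tuple canonical_shift_tuple canonical_shift_tuple_alt
  exact pvCore _ modulus hpre (PySem.List.sorted_ofList_pairwise_lt _)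
    (pvBounds values modulus hpre)
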